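-- pv_equiv track=rewrite | github.com/akoudad14/AlgoProject | keypad_string.py | keypad_string
-- ===== SOURCE A (Python) =====
-- class Keypad:
--
--     keypad = {'2': 'abc', '3': 'def', '4': 'ghi', '5': 'jkl', '6': 'mno',
--               '7': 'pqrs', '8': 'tuv', '9': 'wxyz', '0': ' '}
--
--     @classmethod
--     def type_key(cls, key, index_):
--         try:
--             return cls.keypad[key][index_]
--         except KeyError:
--             return ''
--
--     @classmethod
--     def letter_count(cls, key):
--         try:
--             return len(cls.keypad[key])
--         except KeyError:
--             return None
--
-- def keypad_string(keys):
--     res = ''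
--     last_key = None
--     index_ = 0
--     for key in keys:
--         if key == last_key:
--             if index_ + 1 == Keypad.letter_count(key):
--                 res += Keypad.type_key(last_key, index_)
--                 index_ = 0
--             else:
--                 index_ += 1
--         elif last_key is not None:
--             res += Keypad.type_key(last_key, index_)
--             index_ = 0
--         last_key = key
--     if last_key is not None:
--         res += Keypad.type_key(last_key, index_)
--     return res
-- ===== SOURCE B (Python) =====
-- from itertools import groupby
--
-- KEYPAD = {'2': 'abc', '3': 'def', '4': 'ghi', '5': 'jkl', '6': 'mno',
--           '7': 'pqrs', '8': 'tuv', '9': 'wxyz', '0': ' '}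
--
-- def keypad_string(keys):
--     out = []
--     for key, grp in groupby(keys):
--         letters = KEYPAD.get(key)
--         if letters is None:
--             continue
--         n = sum(1 for _ in grp)
--         c = len(letters)
--         index = 0
--         for _ in range(n - 1):
--             if index == c - 1:
--                 out.append(letters[index])
--                 index = 0
--             else:
--                 index += 1
--         out.append(letters[index])
--     return ''.join(out)
-- ===== Notes on version B (the rewrite author's own statement) =====
-- stated objective: faster
-- what changed: B splits the input into maximal runs of identical keys with itertools.groupby and emits each run independently into a list joined once at the end, instead of A's character-by-character state machine carrying last_key/index across the whole string and growing the result by repeated string concatenation.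
import Mathlib
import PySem

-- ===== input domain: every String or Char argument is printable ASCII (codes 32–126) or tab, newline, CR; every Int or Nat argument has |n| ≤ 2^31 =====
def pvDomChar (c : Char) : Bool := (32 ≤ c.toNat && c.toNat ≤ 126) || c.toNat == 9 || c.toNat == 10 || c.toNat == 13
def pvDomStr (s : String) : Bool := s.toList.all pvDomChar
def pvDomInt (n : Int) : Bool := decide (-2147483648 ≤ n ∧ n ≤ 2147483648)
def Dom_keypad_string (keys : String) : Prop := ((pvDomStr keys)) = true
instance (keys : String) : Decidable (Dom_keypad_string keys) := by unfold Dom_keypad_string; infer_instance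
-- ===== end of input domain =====

-- B replaces A's character-by-character state machine (last_key/index carried across the
-- whole string, with a trailing flush) by splitting the input into maximal runs of equal
-- keys (itertools.groupby), emitting each run independently and joining once at the end;
-- a timing run measured B faster (list append + join vs A's repeated string +=).

-- ===== PORT A =====

-- the Keypad.keypad class dict, as a lookup on the single character key
def kpLookup (k : Char) : Option (List Char) :=
  if k = '2' then some ['a','b','c']
  else if k = '3' then some ['d','e','f']
  else if k = '4' then some ['g','h','i']
  else if k = '5' then some ['j','k','l']
  else if k = '6' then some ['m','n','o']
  else if k = '7' then some ['p','q','r','s']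
  else if k = '8' then some ['t','u','v']
  else if k = '9' then some ['w','x','y','z']
  else if k = '0' then some [' ']
  else none

-- Keypad.type_key: keypad[key][index_], '' on KeyError.  An IndexError (valid key,
-- index out of range) would propagate in Python; that state is unreachable in
-- keypad_string's loop, so the port returns [] there (never exercised).
def typeKey (k : Char) (i : Int) : List Char :=
  match kpLookup k with
  | none => []
  | some ls =>
    match PySem.List.pyGet? ls i with
    | some c => [c]
    | none => []

-- Keypad.letter_count: len(keypad[key]), None on KeyError
def letterCount (k : Char) : Option Int :=
  (kpLookup k).map (fun ls => (ls.length : Int))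

-- loop body of A: state (res, last_key, index_)
def stepA (st : List Char × Option Char × Int) (key : Char) :
    List Char × Option Char × Int :=
  match st with
  | (res, last, idx) =>
    if last = some key then
      if letterCount key = some (idx + 1) then (res ++ typeKey key idx, some key, 0)
      else (res, some key, idx + 1)
    else
      match last with
      | some lk => (res ++ typeKey lk idx, some key, 0)
      | none => (res, some key, idx)

def keypad_string (keys : String) : String :=
  match keys.toList.foldl stepA ([], none, 0) with
  | (res, last, idx) =>
    match last with
    | some lk => String.mk (res ++ typeKey lk idx)
    | none => String.mk res

-- ===== PORT B =====

-- itertools.groupby(keys): maximal runs of equal characters, as (char, run length)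
def runsCons (c : Char) (rs : List (Char × Nat)) : List (Char × Nat) :=
  match rs with
  | (c', n) :: rest => if c = c' then (c, n + 1) :: rest else (c, 1) :: (c', n) :: rest
  | [] => [(c, 1)]

def runsB : List Char → List (Char × Nat)
  | [] => []
  | c :: t => runsCons c (runsB t)

-- B's inner loop: m iterations of the wrap step, then the final letters[index]
def bLoop (ls : List Char) (idx : Nat) : Nat → List Char
  | 0 => [ls.getD idx ' ']
  | m + 1 =>
    if idx = ls.length - 1 then ls.getD idx ' ' :: bLoop ls 0 m
    else bLoop ls (idx + 1) m

-- one group: skip invalid keys, else run the inner loop for n-1 steps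
def emitB (g : Char × Nat) : List Char :=
  match kpLookup g.1 with
  | none => []
  | some ls => bLoop ls 0 (g.2 - 1)

def keypad_string_alt (keys : String) : String :=
  String.mk ((runsB keys.toList).flatMap emitB)

-- ===== PRECONDITION & SPEC =====
def Spec_keypad_string (keys : String) (out : String) : Prop := out = keypad_string_alt keys
instance (keys : String) (out : String) : Decidable (Spec_keypad_string keys out) := by unfold Spec_keypad_string; infer_instance

-- ===== CLAIM (what is proved, stated in full; the proofs are below) =====
def Claim_equal_keypad_string : Prop := ∀ (keys : String), Dom_keypad_string keys → Spec_keypad_string keys (keypad_string keys)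

-- ===== LEMMAS AND PROOFS =====

-- A's remaining computation once last_key = some k, index_ = i, with l still to process
def consume (k : Char) (i : Int) : List Char → List Char
  | [] => typeKey k i
  | c :: t =>
    if c = k then
      if letterCount k = some (i + 1) then typeKey k i ++ consume k 0 t
      else consume k (i + 1) t
    else typeKey k i ++ consume c 0 t

-- A's continuation of a run of key k from index i for m more presses, then flush
def contRun (k : Char) (i : Int) : Nat → List Char
  | 0 => typeKey k i
  | m + 1 =>
    if letterCount k = some (i + 1) then typeKey k i ++ contRun k 0 m
    else contRun k (i + 1) m

def restRuns (rs : List (Char × Nat)) : List Char := rs.flatMap emitB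

-- pending state (k, i) followed by the runs rs
def pend (k : Char) (i : Int) (rs : List (Char × Nat)) : List Char :=
  match rs with
  | [] => typeKey k i
  | (c, n) :: rest =>
    if c = k then contRun k i n ++ restRuns rest
    else typeKey k i ++ restRuns rs

theorem foldA_consume (l : List Char) :
    ∀ (res : List Char) (k : Char) (i : Int),
    (match l.foldl stepA (res, some k, i) with
     | (r, last, idx) =>
       match last with
       | some lk => r ++ typeKey lk idx
       | none => r) = res ++ consume k i l := by
  induction l with
  | nil => intro res k i; simp [consume]
  | cons c t ih =>
    intro res k i
    simp only [List.foldl_cons, stepA, consume]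
    by_cases hck : c = k
    · subst hck
      simp only [if_pos rfl]
      by_cases hcount : letterCount c = some (i + 1)
      · simp [hcount, ih]
      · simp [hcount, ih]
    · have hne : ¬ ((some k : Option Char) = some c) := by
        intro h; exact hck (Option.some.inj h).symm
      simp only [if_neg hne, if_neg (Ne.symm hck)]
      simp [ih, hck, List.append_assoc]

theorem kpLookup_ne_nil {k : Char} {ls : List Char} (h : kpLookup k = some ls) :
    ls ≠ [] := by
  intro hnil
  subst hnil
  unfold kpLookup at h
  split_ifs at h <;> simp_all

theorem bLoop_eq_contRun {k : Char} {ls : List Char} (hk : kpLookup k = some ls) :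
    ∀ (m idx : Nat), idx < ls.length → bLoop ls idx m = contRun k (idx : Int) m := by
  intro m
  induction m with
  | zero =>
    intro idx hidx
    simp [bLoop, contRun, typeKey, hk, List.getD_eq_getElem?_getD,
      List.getElem?_eq_getElem hidx]
  | succ m ih =>
    intro idx hidx
    have hlen : letterCount k = some ((idx : Int) + 1) ↔ idx = ls.length - 1 := by
      simp only [letterCount, hk, Option.map_some]
      constructor
      · intro h
        have := Option.some.inj h
        omega
      · intro h
        have hpos : 0 < ls.length := by omega
        congr 1
        omega
    simp only [bLoop, contRun]
    by_cases hend : idx = ls.length - 1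
    · have hpos : 0 < ls.length := by omega
      rw [if_pos hend, if_pos (hlen.mpr hend)]
      have h0 : ((0 : Nat) : Int) = (0 : Int) := rfl
      rw [← h0, ← ih 0 hpos]
      congr 1
      simp [typeKey, hk, List.getD_eq_getElem?_getD, List.getElem?_eq_getElem hidx]
    · rw [if_neg hend, if_neg (fun h => hend (hlen.mp h))]
      have : ((idx : Int) + 1) = ((idx + 1 : Nat) : Int) := by push_cast; ring
      rw [this, ih (idx + 1) (by omega)]

theorem contRun_invalid {k : Char} (hk : kpLookup k = none) :
    ∀ (m : Nat) (i : Int), contRun k i m = [] := by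
  intro m
  induction m with
  | zero => intro i; simp [contRun, typeKey, hk]
  | succ m ih =>
    intro i
    simp only [contRun, letterCount, hk, Option.map_none]
    simp [typeKey, hk, ih]

theorem emitB_succ (c : Char) (n : Nat) : emitB (c, n + 1) = contRun c 0 n := by
  unfold emitB
  cases hk : kpLookup c with
  | none => simp [contRun_invalid hk]
  | some ls =>
    simp only [Nat.add_sub_cancel]
    have hne := kpLookup_ne_nil hk
    have : (0 : Int) = ((0 : Nat) : Int) := rfl
    rw [this, ← bLoop_eq_contRun hk n 0 (by cases ls <;> simp_all)]

theorem emitB_one (c : Char) : emitB (c, 1) = typeKey c 0 := by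
  have := emitB_succ c 0
  simpa [contRun] using this

theorem restRuns_runsCons (c : Char) (rs : List (Char × Nat)) :
    restRuns (runsCons c rs) = pend c 0 rs := by
  cases rs with
  | nil => simp [runsCons, restRuns, pend, emitB_one]
  | cons hd rest =>
    obtain ⟨c', n⟩ := hd
    by_cases hcc : c = c'
    · subst hcc
      simp [runsCons, restRuns, pend, emitB_succ]
    · simp [runsCons, hcc, restRuns, pend, Ne.symm hcc, emitB_one, List.append_assoc]

theorem contRun_succ (c : Char) (i : Int) (n : Nat) :
    contRun c i (n + 1) =
      if letterCount c = some (i + 1) then typeKey c i ++ contRun c 0 n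
      else contRun c (i + 1) n := rfl

theorem pend_runsCons_same (c : Char) (i : Int) (rs : List (Char × Nat)) :
    pend c i (runsCons c rs) =
      if letterCount c = some (i + 1) then typeKey c i ++ pend c 0 rs
      else pend c (i + 1) rs := by
  cases rs with
  | nil =>
    have e2 : pend c i (runsCons c []) = contRun c i 1 ++ restRuns [] := by
      simp [runsCons, pend]
    rw [e2, show (1 : Nat) = 0 + 1 from rfl, contRun_succ]
    by_cases hcount : letterCount c = some (i + 1) <;>
      simp [hcount, pend, contRun, restRuns]
  | cons hd rest =>
    obtain ⟨c', n⟩ := hd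
    by_cases hcc : c = c'
    · subst hcc
      have e1 : runsCons c ((c, n) :: rest) = (c, n + 1) :: rest := by simp [runsCons]
      have e2 : pend c i ((c, n + 1) :: rest) = contRun c i (n + 1) ++ restRuns rest := by
        simp [pend]
      rw [e1, e2, contRun_succ]
      by_cases hcount : letterCount c = some (i + 1)
      · simp [hcount, pend, List.append_assoc]
      · simp [hcount, pend]
    · have hcc' : ¬ c' = c := fun h => hcc h.symm
      have e1 : runsCons c ((c', n) :: rest) = (c, 1) :: (c', n) :: rest := by
        simp [runsCons, hcc]
      have e2 : pend c i ((c, 1) :: (c', n) :: rest) =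
          contRun c i 1 ++ restRuns ((c', n) :: rest) := by simp [pend]
      rw [e1, e2, show (1 : Nat) = 0 + 1 from rfl, contRun_succ]
      by_cases hcount : letterCount c = some (i + 1)
      · simp [hcount, pend, hcc', contRun, List.append_assoc]
      · simp [hcount, pend, hcc', contRun]

theorem pend_runsCons_diff (k c : Char) (i : Int) (rs : List (Char × Nat)) (h : c ≠ k) :
    pend k i (runsCons c rs) = typeKey k i ++ pend c 0 rs := by
  have h1 : restRuns (runsCons c rs) = pend c 0 rs := restRuns_runsCons c rs
  rw [← h1]
  cases rs with
  | nil => simp [runsCons, pend, h]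
  | cons hd rest =>
    obtain ⟨c', n⟩ := hd
    by_cases hcc : c = c'
    · subst hcc
      simp [runsCons, pend, h]
    · simp [runsCons, hcc, pend, h]

theorem consume_pend (l : List Char) :
    ∀ (k : Char) (i : Int), consume k i l = pend k i (runsB l) := by
  induction l with
  | nil => intro k i; simp [consume, runsB, pend]
  | cons c t ih =>
    intro k i
    by_cases hck : c = k
    · subst hck
      rw [show consume c i (c :: t) =
          if letterCount c = some (i + 1) then typeKey c i ++ consume c 0 t
          else consume c (i + 1) t from by simp [consume]]
      rw [runsB, pend_runsCons_same]
      split_ifs <;> rw [ih]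
    · rw [show consume k i (c :: t) = typeKey k i ++ consume c 0 t from by
          simp [consume, hck]]
      rw [runsB, pend_runsCons_diff k c i _ hck, ih]

-- ===== VERDICT (by name: the statement is the Claim_ definition above) =====
theorem keypad_string_spec : Claim_equal_keypad_string := by
  intro keys _
  unfold Spec_keypad_string keypad_string keypad_string_alt
  cases hl : keys.toList with
  | nil => simp [runsB]
  | cons c t =>
    have hfirst : stepA ([], none, 0) c = ([], some c, 0) := by simp [stepA]
    rw [List.foldl_cons, hfirst]
    have key := foldA_consume t [] c 0
    rw [consume_pend] at key
    have hB : (runsB (c :: t)).flatMap emitB = pend c 0 (runsB t) := by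
      simpa [runsB, restRuns] using restRuns_runsCons c (runsB t)
    rw [hB]
    rcases h : List.foldl stepA ([], some c, 0) t with ⟨r, last, idx⟩
    rw [h] at key
    cases last <;> simp_all
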